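-- pv_equiv track=rewrite | github.com/xeniabeckel/bikeshed | bikeshed/update/updateCrossRefs.py | extractForsData
-- ===== SOURCE A (Python) =====
-- from collections import defaultdict, OrderedDict
--
-- def extractForsData(anchors):
--     """Compile a db of {for value => dict terms that use that for value}"""
--
--     fors = defaultdict(set)
--     for key, anchors_ in anchors.items():
--         for anchor in anchors_:
--             for for_ in anchor["for"]:
--                 if for_ == "":
--                     continue
--                 fors[for_].add(key)
--             if not anchor["for"]:
--                 fors["/"].add(key)
--     for key, val in list(fors.items()):
--         fors[key] = sorted(val)
--     return fors
-- ===== SOURCE B (Python) =====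
-- from collections import defaultdict
--
-- def extractForsData(anchors):
--     """Compile a db mapping each for value to the dict terms that use it"""
--     # Flatten to (for-value, key) pairs, then build each bucket by one comprehension.
--     pairs = []
--     for key, anchors_ in anchors.items():
--         for anchor in anchors_:
--             fs = anchor["for"]
--             for f in fs:
--                 if f != "":
--                     pairs.append((f, key))
--             if not fs:
--                 pairs.append(("/", key))
--     order = list(dict.fromkeys(f for f, _ in pairs))
--     return defaultdict(set, {f: sorted({k for g, k in pairs if g == f}) for f in order})
-- ===== Notes on version B (the rewrite author's own statement) =====
-- stated objective: alternative
-- what changed: A threads a mutable dict of sets through three nested loops and then re-sorts every bucket in a second in-place pass; B first flattens the anchors into a flat (for-value, key) pair list, takes the ordered dedup of the for-values, and builds each bucket with one sorted-set comprehension over that pair list.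
import Mathlib
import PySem

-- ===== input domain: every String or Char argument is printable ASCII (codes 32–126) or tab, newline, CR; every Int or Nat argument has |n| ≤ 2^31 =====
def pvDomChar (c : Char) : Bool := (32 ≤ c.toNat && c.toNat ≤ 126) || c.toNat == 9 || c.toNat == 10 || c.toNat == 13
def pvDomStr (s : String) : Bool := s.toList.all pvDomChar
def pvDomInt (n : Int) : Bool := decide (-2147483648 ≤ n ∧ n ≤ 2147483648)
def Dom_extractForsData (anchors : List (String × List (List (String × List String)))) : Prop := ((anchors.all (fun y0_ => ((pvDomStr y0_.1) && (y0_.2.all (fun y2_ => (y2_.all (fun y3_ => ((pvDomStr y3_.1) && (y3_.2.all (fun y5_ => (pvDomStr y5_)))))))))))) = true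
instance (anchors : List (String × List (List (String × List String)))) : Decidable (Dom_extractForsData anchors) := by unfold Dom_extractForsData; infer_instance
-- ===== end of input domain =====

-- B replaces A's incrementally mutated dict-of-sets (plus an in-place re-sort pass) by a
-- flat pair list, an ordered key dedup, and one sorted-set comprehension per for-value (alternative
-- decomposition, not claimed faster).

-- anchor["for"]: first-match association lookup; total form, exact under Pre_ (key present)
def pyForList (anchor : List (String × List String)) : List String :=
  ((anchor.find? (fun q => q.1 == "for")).map (·.2)).getD []

-- ===== PORT A =====
def extractForsData (anchors : List (String × List (List (String × List String)))) : List (String × List String) :=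
  let fors : PySem.Dict String (PySem.Set String) :=
    anchors.foldl (fun d kv =>
      kv.2.foldl (fun d anchor =>
        let fs := pyForList anchor
        let d := fs.foldl (fun d f =>
          if f == "" then d
          else d.modify f [] (fun s => PySem.Set.add s kv.1)) d
        if fs.isEmpty then d.modify "/" [] (fun s => PySem.Set.add s kv.1) else d) d)
      PySem.Dict.empty
  -- Python's final loop overwrites every key in place, in order, with sorted(val);
  -- with the value type changing set→list this is exactly a map over the items.
  fors.items.map (fun p => (p.1, PySem.List.sorted p.2 (fun x => x) false))

-- ===== PORT B =====
def extractForsData_alt (anchors : List (String × List (List (String × List String)))) : List (String × List String) :=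
  let pairs : List (String × String) :=
    anchors.foldl (fun acc kv =>
      kv.2.foldl (fun acc anchor =>
        let fs := pyForList anchor
        let acc := fs.foldl (fun acc f =>
          if f != "" then acc ++ [(f, kv.1)] else acc) acc
        if fs.isEmpty then acc ++ [("/", kv.1)] else acc) acc) []
  let order := PySem.List.dedup (pairs.map (·.1))
  order.map (fun f =>
    (f, PySem.List.sorted (PySem.Set.ofList ((pairs.filter (fun p => p.1 == f)).map (·.2)))
          (fun x => x) false))

-- ===== PRECONDITION & SPEC =====
-- Pre_: every anchor dict carries the key "for"; otherwise Python A raises KeyError at anchor["for"].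
def Pre_extractForsData (anchors : List (String × List (List (String × List String)))) : Prop :=
  (anchors.all (fun kv => kv.2.all (fun anchor => anchor.any (fun q => q.1 == "for")))) = true
instance (anchors : List (String × List (List (String × List String)))) : Decidable (Pre_extractForsData anchors) := by unfold Pre_extractForsData; infer_instance

def pvWitness_extractForsData : (List (String × List (List (String × List String)))) :=
  [("key1", [[("for", ["x", ""])], [("for", [])]]), ("key2", [[("for", ["x"])]])]

def Spec_extractForsData (anchors : List (String × List (List (String × List String)))) (out : List (String × List String)) : Prop := out = extractForsData_alt anchors
instance (anchors : List (String × List (List (String × List String)))) (out : List (String × List String)) : Decidable (Spec_extractForsData anchors out) := by unfold Spec_extractForsData; infer_instance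

-- ===== CLAIM (what is proved, stated in full; the proofs are below) =====
def Claim_equal_extractForsData : Prop := ∀ (anchors : List (String × List (List (String × List String)))), Dom_extractForsData anchors → Pre_extractForsData anchors → Spec_extractForsData anchors (extractForsData anchors)

-- ===== LEMMAS AND PROOFS =====

-- the flattened (for-value, key) pair list both programs conceptually traverse
def pvChunk (k : String) (anchor : List (String × List String)) : List (String × String) :=
  ((pyForList anchor).filter (fun f => f != "")).map (fun f => (f, k))
    ++ (if (pyForList anchor).isEmpty then [("/", k)] else [])

def pvFlat (anchors : List (String × List (List (String × List String)))) : List (String × String) :=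
  anchors.flatMap (fun kv => kv.2.flatMap (fun anchor => pvChunk kv.1 anchor))

-- one dict step of A per pair
def pvStep (d : PySem.Dict String (PySem.Set String)) (p : String × String) : PySem.Dict String (PySem.Set String) :=
  d.modify p.1 [] (fun s => PySem.Set.add s p.2)

theorem pvB_inner (k : String) (fs : List String) (acc : List (String × String)) :
    fs.foldl (fun acc f => if f != "" then acc ++ [(f, k)] else acc) acc
    = acc ++ (fs.filter (fun f => f != "")).map (fun f => (f, k)) := by
  exact PySem.List.foldl_append_if (fun f => f != "") (fun f => (f, k)) fs acc

theorem pvB_anchor (k : String) (anchor : List (String × List String)) (acc : List (String × String)) :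
    (let fs := pyForList anchor
     let acc := fs.foldl (fun acc f => if f != "" then acc ++ [(f, k)] else acc) acc
     if fs.isEmpty then acc ++ [("/", k)] else acc)
    = acc ++ pvChunk k anchor := by
  simp only [pvChunk, pvB_inner]
  split <;> simp

theorem pvFoldl_step_flatMap {β : Type} (g : β → List (String × String)) (l : List β)
    (d : PySem.Dict String (PySem.Set String)) :
    l.foldl (fun d x => (g x).foldl pvStep d) d = (l.flatMap g).foldl pvStep d := by
  induction l generalizing d with
  | nil => rfl
  | cons a t ih => simp only [List.foldl_cons, List.flatMap_cons, List.foldl_append, ih]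

theorem pvB_pairs (anchors : List (String × List (List (String × List String))))
    (acc : List (String × String)) :
    anchors.foldl (fun acc kv =>
      kv.2.foldl (fun acc anchor =>
        let fs := pyForList anchor
        let acc := fs.foldl (fun acc f =>
          if f != "" then acc ++ [(f, kv.1)] else acc) acc
        if fs.isEmpty then acc ++ [("/", kv.1)] else acc) acc) acc
    = acc ++ pvFlat anchors := by
  have hanch : ∀ (k : String) (l : List (List (String × List String))) (acc : List (String × String)),
      l.foldl (fun acc anchor =>
        let fs := pyForList anchor
        let acc := fs.foldl (fun acc f =>
          if f != "" then acc ++ [(f, k)] else acc) acc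
        if fs.isEmpty then acc ++ [("/", k)] else acc) acc
      = acc ++ l.flatMap (pvChunk k) := by
    intro k l acc
    simp only [pvB_anchor]
    exact PySem.List.foldl_append_eq_flatMap _ l acc
  simp only [hanch]
  exact PySem.List.foldl_append_eq_flatMap _ anchors acc

theorem pvA_inner (k : String) (fs : List String) (d : PySem.Dict String (PySem.Set String)) :
    fs.foldl (fun d f =>
      if f == "" then d
      else d.modify f [] (fun s => PySem.Set.add s k)) d
    = ((fs.filter (fun f => f != "")).map (fun f => (f, k))).foldl pvStep d := by
  induction fs generalizing d with
  | nil => rfl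
  | cons f t ih =>
    cases hfb : (f == "") with
    | true =>
      have h2 : (f != "") = false := by simp [bne, hfb]
      simp only [List.foldl_cons, hfb, if_true, List.filter_cons, h2, Bool.false_eq_true, if_false]
      exact ih d
    | false =>
      have h2 : (f != "") = true := by simp [bne, hfb]
      simp only [List.foldl_cons, hfb, Bool.false_eq_true, if_false, List.filter_cons, h2,
        if_true, List.map_cons]
      exact ih _

theorem pvA_anchor (k : String) (anchor : List (String × List String))
    (d : PySem.Dict String (PySem.Set String)) :
    (let fs := pyForList anchor
     let d := fs.foldl (fun d f =>
       if f == "" then d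
       else d.modify f [] (fun s => PySem.Set.add s k)) d
     if fs.isEmpty then d.modify "/" [] (fun s => PySem.Set.add s k) else d)
    = (pvChunk k anchor).foldl pvStep d := by
  simp only [pvChunk, pvA_inner, List.foldl_append]
  split <;> simp [pvStep]

theorem pvA_fold (anchors : List (String × List (List (String × List String))))
    (d : PySem.Dict String (PySem.Set String)) :
    anchors.foldl (fun d kv =>
      kv.2.foldl (fun d anchor =>
        let fs := pyForList anchor
        let d := fs.foldl (fun d f =>
          if f == "" then d
          else d.modify f [] (fun s => PySem.Set.add s kv.1)) d
        if fs.isEmpty then d.modify "/" [] (fun s => PySem.Set.add s kv.1) else d) d) d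
    = (pvFlat anchors).foldl pvStep d := by
  simp only [pvA_anchor, pvFoldl_step_flatMap]
  rfl

theorem pvStep_getD (P : List (String × String)) (d : PySem.Dict String (PySem.Set String)) (f : String) :
    (P.foldl pvStep d).getD f [] =
      PySem.Set.update (d.getD f []) ((P.filter (fun p => p.1 == f)).map (·.2)) := by
  induction P generalizing d with
  | nil => rfl
  | cons p t ih =>
    simp only [List.foldl_cons, ih, pvStep]
    by_cases hp : p.1 = f
    · have hb : (p.1 == f) = true := by simp [hp]
      simp [hp, PySem.Set.update]
    · have hb : (p.1 == f) = false := by simp [hp]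
      have hne : f ≠ p.1 := fun h => hp h.symm
      simp [hb, PySem.Dict.getD_modify, hne]

-- ===== VERDICT (by name: the statement is the Claim_ definition above) =====

theorem extractForsData_spec : Claim_equal_extractForsData := by
  intro anchors _ _
  unfold Spec_extractForsData extractForsData extractForsData_alt
  simp only [pvA_fold, pvB_pairs, List.nil_append]
  have hkeys : ((pvFlat anchors).foldl pvStep PySem.Dict.empty).keys
      = PySem.Set.ofList ((pvFlat anchors).map (·.1)) := by
    have := PySem.Dict.keys_foldl_modify_key (pvFlat anchors) (fun p => p.1)
      ([] : PySem.Set String) (fun _ p s => PySem.Set.add s p.2) PySem.Dict.empty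
    simpa [pvStep, PySem.Dict.keys_empty, PySem.Set.update_nil_left] using this
  have hnd : ((pvFlat anchors).foldl pvStep PySem.Dict.empty).keys.Nodup := by
    rw [hkeys]; exact PySem.Set.nodup_ofList _
  rw [PySem.Dict.items_eq_map_keys _ hnd ([] : PySem.Set String), hkeys, List.map_map]
  rw [PySem.List.dedup_eq_ofList]
  apply List.map_congr_left
  intro f _
  simp only [Function.comp]
  rw [pvStep_getD, PySem.Dict.getD_empty, PySem.Set.update_nil_left]
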